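-- pv_equiv track=rewrite | github.com/ViniDias1/UFS-code-Exercises | Projetos-Arq-de-Computadores/ENVIADOpoxim1.py | complementa2
-- ===== SOURCE A (Python) =====
-- def complementa2(str):
--     n = len(str)
--     i = n - 1
--     if str == '0':
--         return "0"
--     if len(str) == 31:
--         if str[:6] == '111111':
--             return str
--     while(i >= 0):
--         if (str[i] == '1'):
--             break
--         i -= 1
--
--     if (i == -1):
--         return '1'+str
--
--     k = i - 1
--     while(k >= 0):
--
--         if (str[k] == '1'):
--             str = list(str)
--             str[k] = '0'
--             str = ''.join(str)
--         else:
--             str = list(str)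
--             str[k] = '1'
--             str = ''.join(str)
--         k -= 1
--
--     return str
-- ===== SOURCE B (Python) =====
-- def complementa2(str):
--     if str == '0':
--         return '0'
--     if len(str) == 31 and str[:6] == '111111':
--         return str
--     out = []
--     seen = False
--     for c in reversed(str):
--         if seen:
--             out.append('0' if c == '1' else '1')
--         else:
--             out.append(c)
--             seen = seen or c == '1'
--     if not seen:
--         out.append('1')
--     return ''.join(reversed(out))
-- ===== Notes on version B (the rewrite author's own statement) =====
-- stated objective: simpler
-- what changed: Replaces A's two staged index loops (a downward while-loop locating the last '1', then a second while-loop rewriting the string via list/''.join at every earlier position) with a single right-to-left pass carrying a seen-flag -- the classic two's-complement negation scan -- which copies characters until the first '1' is seen and flips the rest, the no-'1' case falling out of the same pass.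
import Mathlib
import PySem

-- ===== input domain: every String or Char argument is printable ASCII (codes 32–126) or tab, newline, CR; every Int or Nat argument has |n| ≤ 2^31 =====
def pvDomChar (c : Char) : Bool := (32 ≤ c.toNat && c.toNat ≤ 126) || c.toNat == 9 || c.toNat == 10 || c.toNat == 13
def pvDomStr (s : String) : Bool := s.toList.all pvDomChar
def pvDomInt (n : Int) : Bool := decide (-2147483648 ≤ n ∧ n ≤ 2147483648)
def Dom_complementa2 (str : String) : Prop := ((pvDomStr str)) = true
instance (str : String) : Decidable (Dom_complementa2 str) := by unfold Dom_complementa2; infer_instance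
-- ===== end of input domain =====

-- B replaces A's two staged index loops (downward scan for the last '1', then an
-- in-place flip of every earlier position) with one right-to-left pass carrying a
-- seen-flag (the classic two's-complement negation scan): simpler, single pass.

-- ===== PORT A =====
-- 'while(i >= 0): if str[i]=="1": break; i -= 1' — downward scan; none = loop fell
-- through with Python i == -1 (str[i] with 0 ≤ i < len is the l[i]? lookup).
def pvAFind (l : List Char) : Nat → Option Nat
  | 0 => if l[0]? = some '1' then some 0 else none
  | i + 1 => if l[i + 1]? = some '1' then some (i + 1) else pvAFind l i

-- 'while(k >= 0): str[k] = "0" if str[k]=="1" else "1"; k -= 1' — the argument is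
-- k + 1 (the number of remaining positions); str[k] (always in range here) is getD.
def pvAFlip (l : List Char) : Nat → List Char
  | 0 => l
  | k + 1 => pvAFlip (l.set k (if l.getD k ' ' = '1' then '0' else '1')) k

def complementa2 (str : String) : String :=
  let l := str.toList
  if str = "0" then "0"
  else if PySem.Str.len str = 31 ∧ l.take 6 = ("111111" : String).toList then str
    -- nested early-return ifs 'if len(str)==31: if str[:6]=="111111": return str'; str[:6] is take 6
  else
    match pvAFind l (l.length - 1) with
    | none => String.ofList ('1' :: l)          -- i == -1: return '1' + str
    | some i => String.ofList (pvAFlip l i)     -- k runs i-1 … 0: i iterations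

-- ===== PORT B =====
-- '"0" if c == "1" else "1"'
def pvFlipChar (c : Char) : Char := if c == '1' then '0' else '1'

-- 'for c in reversed(str): …' — the loop body appends to out and keeps the seen
-- flag; consing to the accumulator builds reversed(out) directly, so the final
-- ''.join(reversed(out)) is the accumulator itself.
def pvBLoop : List Char → List Char → Bool → List Char × Bool
  | [], out, seen => (out, seen)
  | c :: t, out, seen =>
    if seen then pvBLoop t (pvFlipChar c :: out) true
    else pvBLoop t (c :: out) (seen || (c == '1'))

def complementa2_alt (str : String) : String :=
  if str = "0" then "0"
  else if PySem.Str.len str = 31 ∧ str.toList.take 6 = ("111111" : String).toList then str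
  else
    let r := pvBLoop str.toList.reverse [] false
    if r.2 then String.ofList r.1
    else String.ofList ('1' :: r.1)   -- 'if not seen: out.append("1")' before the final reversal

-- ===== PRECONDITION & SPEC =====
def Spec_complementa2 (str : String) (out : String) : Prop := out = complementa2_alt str
instance (str : String) (out : String) : Decidable (Spec_complementa2 str out) := by unfold Spec_complementa2; infer_instance

-- ===== CLAIM (what is proved, stated in full; the proofs are below) =====
def Claim_equal_complementa2 : Prop := ∀ (str : String), Dom_complementa2 str → Spec_complementa2 str (complementa2 str)

-- ===== LEMMAS AND PROOFS =====

-- A's downward scan only returns indices inside the list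
lemma pv_find_lt (l : List Char) : ∀ i j : Nat, pvAFind l i = some j → j < l.length := by
  intro i
  induction i with
  | zero =>
      intro j h
      by_cases h0 : l[0]? = some '1' <;> simp [pvAFind, h0] at h
      subst h
      rw [List.getElem?_eq_some_iff] at h0; exact h0.1
  | succ m ih =>
      intro j h
      by_cases h0 : l[m + 1]? = some '1' <;> simp [pvAFind, h0] at h
      · subst h
        rw [List.getElem?_eq_some_iff] at h0; exact h0.1
      · exact ih j h

-- appending one char does not change the scan below the old length
lemma pv_find_append (xs : List Char) (x : Char) :
    ∀ i, i < xs.length → pvAFind (xs ++ [x]) i = pvAFind xs i := by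
  intro i
  induction i with
  | zero =>
      intro h
      simp only [pvAFind]
      rw [List.getElem?_append_left h]
  | succ m ih =>
      intro h
      simp only [pvAFind, List.getElem?_append_left h, ih (by omega)]

-- A's in-place flip loop builds exactly: flipped prefix (below j) ++ unchanged suffix
lemma pv_flip_eq : ∀ (j : Nat) (l : List Char), j ≤ l.length →
    pvAFlip l j = (l.take j).map pvFlipChar ++ l.drop j := by
  intro j
  induction j with
  | zero => intro l _; simp [pvAFlip]
  | succ k ih =>
      intro l h
      have hk : k < l.length := by omega
      have hget : l.getD k ' ' = l[k] := List.getD_eq_getElem l ' ' hk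
      rw [pvAFlip, hget]
      rw [List.set_eq_take_cons_drop _ hk]
      rw [ih _ (by simp; omega)]
      rw [List.take_left' (by simp [Nat.min_eq_left (Nat.le_of_lt hk)]),
          List.drop_left' (by simp [Nat.min_eq_left (Nat.le_of_lt hk)])]
      rw [List.take_succ_eq_append_getElem hk]
      simp only [List.map_append, List.map_cons, List.map_nil, pvFlipChar, beq_iff_eq,
        List.append_assoc, List.cons_append, List.nil_append]

-- once seen, B's pass flips every remaining char
lemma pv_bloop_true (l : List Char) : ∀ out,
    pvBLoop l out true = (l.reverse.map pvFlipChar ++ out, true) := by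
  induction l with
  | nil => intro out; simp [pvBLoop]
  | cons c t ih => intro out; simp [pvBLoop, ih]

-- B's single pass computes exactly what A's two staged loops compute
lemma pv_main (l : List Char) : ∀ out : List Char,
    pvBLoop l.reverse out false =
      match pvAFind l (l.length - 1) with
      | none => (l ++ out, false)
      | some i => ((l.take i).map pvFlipChar ++ l.drop i ++ out, true) := by
  induction l using List.reverseRecOn with
  | nil => intro out; simp [pvBLoop, pvAFind]
  | append_singleton xs x ih =>
      intro out
      have hlen : (xs ++ [x]).length - 1 = xs.length := by simp
      have hx : (xs ++ [x])[xs.length]? = some x := by simp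
      have hfind : pvAFind (xs ++ [x]) xs.length =
          if x = '1' then some xs.length
          else if xs.length = 0 then none
          else pvAFind xs (xs.length - 1) := by
        cases hxl : xs.length with
        | zero =>
            have : xs = [] := List.eq_nil_of_length_eq_zero hxl
            subst this
            simp [pvAFind]
        | succ m =>
            have h1 : pvAFind (xs ++ [x]) (m + 1) =
                if (xs ++ [x])[m + 1]? = some '1' then some (m + 1) else pvAFind (xs ++ [x]) m := rfl
            rw [hxl] at hx
            rw [h1, hx]
            have hrec : pvAFind (xs ++ [x]) m = pvAFind xs m :=
              pv_find_append xs x _ (by omega)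
            simp [hrec]
      rw [List.reverse_append]
      simp only [List.reverse_singleton, List.singleton_append]
      rw [pvBLoop]
      simp only [Bool.false_or, if_neg (by simp : ¬ (false = true))]
      by_cases hx1 : x = '1'
      · subst hx1
        simp only [beq_self_eq_true]
        rw [pv_bloop_true]
        rw [hlen, hfind]
        simp [List.take_append_of_le_length (le_refl xs.length),
              List.drop_append_of_le_length (le_refl xs.length)]
      · have hbx : (x == '1') = false := by simp [hx1]
        rw [hbx]
        rw [ih (x :: out)]
        rw [hlen, hfind, if_neg hx1]
        cases hxs : xs.length with
        | zero =>
            have : xs = [] := List.eq_nil_of_length_eq_zero hxs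
            subst this
            simp [pvAFind]
        | succ m =>
            simp only [if_neg (by omega : ¬ m + 1 = 0)]
            cases hf : pvAFind xs (m + 1 - 1) with
            | none => simp
            | some i =>
                have hi : i < xs.length := pv_find_lt _ _ _ hf
                simp [List.take_append_of_le_length (Nat.le_of_lt hi),
                      List.drop_append_of_le_length (Nat.le_of_lt hi)]

-- ===== VERDICT (by name: the statement is the Claim_ definition above) =====
theorem complementa2_spec : Claim_equal_complementa2 := by
  intro str _
  unfold Spec_complementa2 complementa2 complementa2_alt
  by_cases h0 : str = "0"
  · simp [h0]
  by_cases h31 : PySem.Str.len str = 31 ∧ str.toList.take 6 = ("111111" : String).toList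
  · simp only [if_neg h0, if_pos h31]
  · simp only [if_neg h0, if_neg h31]
    have hm := pv_main str.toList []
    cases h : pvAFind str.toList (str.toList.length - 1) with
    | none =>
        rw [h] at hm
        simp only at hm
        simp [hm]
    | some i =>
        rw [h] at hm
        simp only at hm
        have hi := pv_find_lt _ _ _ h
        simp [hm, pv_flip_eq i _ (Nat.le_of_lt hi)]
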